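-- pv_equiv track=rewrite | github.com/duzitong/homo | prime.py | get_biggest_prime_less_than_x
-- ===== SOURCE A (Python) =====
-- def factor(num, primes):
--     for prime in primes:
--         if num % prime == 0:
--             return prime
--     return None
--
-- def get_biggest_prime_less_than_x(x):
--     primes = []
--     for i in range(2, x):
--         for prime in primes:
--             if i % prime == 0:
--                 break
--         else:
--             primes.insert(0, i)
--
--     if primes:
--         return primes[0], factor(primes[0] + 1, primes)
--     else:
--         return None, None
-- ===== SOURCE B (Python) =====
-- def get_biggest_prime_less_than_x(x):
--     # Sieve of Eratosthenes-style composite marking, then scan primes descending.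
--     if x <= 2:
--         return None, None
--     comp = [False] * x
--     for k in range(2, x):
--         for m in range(2 * k, x, k):
--             comp[m] = True
--     primes_desc = [i for i in range(2, x) if not comp[i]][::-1]
--     if not primes_desc:
--         return None, None
--     p = primes_desc[0]
--     for q in primes_desc:
--         if (p + 1) % q == 0:
--             return p, q
--     return p, None
-- ===== Notes on version B (the rewrite author's own statement) =====
-- stated objective: faster
-- what changed: Replaces trial division of every i against the list of all smaller primes with a sieve that marks composites by striding over multiples, then reads the primes off the sieve and scans them descending for a factor of largest+1.
import Mathlib
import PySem

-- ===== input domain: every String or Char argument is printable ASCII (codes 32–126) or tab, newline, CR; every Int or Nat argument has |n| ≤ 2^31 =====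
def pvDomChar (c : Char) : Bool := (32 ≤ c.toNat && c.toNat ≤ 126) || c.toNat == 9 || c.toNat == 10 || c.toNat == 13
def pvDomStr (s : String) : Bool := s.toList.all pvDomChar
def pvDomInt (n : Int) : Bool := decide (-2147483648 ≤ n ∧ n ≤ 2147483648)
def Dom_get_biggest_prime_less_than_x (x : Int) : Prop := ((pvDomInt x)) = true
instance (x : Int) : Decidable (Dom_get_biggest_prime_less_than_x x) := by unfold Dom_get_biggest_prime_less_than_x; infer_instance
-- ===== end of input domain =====

-- B replaces A's per-candidate trial division against the list of all smaller primes with a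
-- sieve that marks composites by striding over multiples (objective: faster).

-- ===== PORT A =====
-- factor(num, primes): return the first prime in the list dividing num, else None
def pvFactor (num : Int) (primes : List Int) : Option Int :=
  primes.find? (fun prime => PySem.Int.mod num prime == 0)

def get_biggest_prime_less_than_x (x : Int) : Option Int × Option Int :=
  -- primes = [] ; for i in range(2, x): for/break/else — if some prime in the list divides i,
  -- break; else primes.insert(0, i)
  match (PySem.List.pyRange 2 x).foldl
      (fun primes i =>
        if primes.any (fun prime => PySem.Int.mod i prime == 0) then primes
        else PySem.List.insert primes 0 i)
      [] with
  | [] => (none, none)                                     -- if not primes: return None, None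
  | p :: rest => (some p, pvFactor (p + 1) (p :: rest))    -- primes[0], factor(primes[0]+1, primes)

-- ===== PORT B =====
def get_biggest_prime_less_than_x_alt (x : Int) : Option Int × Option Int :=
  if x ≤ 2 then (none, none)
  else
    -- comp = [False]*x ; for k in range(2, x): for m in range(2*k, x, k): comp[m] = True
    -- the Python list of bools is ported as an Array threaded linearly (in-place update);
    -- comp[m] = True is setIfInBounds m.toNat (exact: here always 0 ≤ 2*k ≤ m < x = size),
    -- and the read comp[i] is getD i.toNat false (exact: here always 0 ≤ 2 ≤ i < x = size)
    let comp :=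
      (PySem.List.pyRange 2 x).foldl
        (fun comp k =>
          (PySem.List.pyRange (2 * k) x k).foldl
            (fun comp m => comp.setIfInBounds m.toNat true) comp)
        (Array.replicate x.toNat false)
    -- primes_desc = [i for i in range(2, x) if not comp[i]][::-1]   ([::-1] is reverse:
    -- PySem.List.slice?_none_none_neg_one)
    match ((PySem.List.pyRange 2 x).filter (fun i => !(comp.getD i.toNat false))).reverse with
    | [] => (none, none)
    | p :: rest =>
      -- for q in primes_desc: if (p+1) % q == 0: return p, q — first match; else return p, None
      (some p, (p :: rest).find? (fun q => PySem.Int.mod (p + 1) q == 0))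

-- ===== PRECONDITION & SPEC =====
def Spec_get_biggest_prime_less_than_x (x : Int) (out : Option Int × Option Int) : Prop := out = get_biggest_prime_less_than_x_alt x
instance (x : Int) (out : Option Int × Option Int) : Decidable (Spec_get_biggest_prime_less_than_x x out) := by unfold Spec_get_biggest_prime_less_than_x; infer_instance

-- ===== CLAIM (what is proved, stated in full; the proofs are below) =====
def Claim_equal_get_biggest_prime_less_than_x : Prop := ∀ (x : Int), Dom_get_biggest_prime_less_than_x x → Spec_get_biggest_prime_less_than_x x (get_biggest_prime_less_than_x x)

-- ===== LEMMAS AND PROOFS =====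

/-- `isP i = true` iff the integer `i` is (a cast of) a prime number. -/
def isP (i : Int) : Bool := decide (Nat.Prime i.toNat)

theorem not_prime_iff_exists_dvd (b : Int) (hb : 2 ≤ b) :
    ¬ Nat.Prime b.toNat ↔ ∃ d : Int, 2 ≤ d ∧ d < b ∧ d ∣ b := by
  constructor
  · intro h
    rw [Nat.prime_def_lt] at h
    push Not at h
    obtain ⟨m, hm, hmd, hm1⟩ := h (by omega)
    have hm0 : m ≠ 0 := by rintro rfl; simp [Nat.eq_zero_of_zero_dvd hmd] at hm
    refine ⟨(m : Int), by omega, by omega, ?_⟩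
    have := Int.natCast_dvd_natCast.mpr hmd
    rwa [Int.toNat_of_nonneg (by omega)] at this
  · rintro ⟨d, hd2, hdb, hdvd⟩ hp
    have h1 : (d.toNat : Int) = d := Int.toNat_of_nonneg (by omega)
    have h2 : (b.toNat : Int) = b := Int.toNat_of_nonneg (by omega)
    have : d.toNat ∣ b.toNat := by
      rw [← Int.natCast_dvd_natCast, h1, h2]; exact hdvd
    rcases (Nat.Prime.eq_one_or_self_of_dvd hp _ this) with h | h <;> omega

theorem not_prime_iff_exists_prime_dvd (b : Int) (hb : 2 ≤ b) :
    ¬ Nat.Prime b.toNat ↔ ∃ p : Int, 2 ≤ p ∧ p < b ∧ Nat.Prime p.toNat ∧ p ∣ b := by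
  constructor
  · intro h
    obtain ⟨d, hd2, hdb, hdvd⟩ := (not_prime_iff_exists_dvd b hb).mp h
    have hd1 : d.toNat ≠ 1 := by omega
    have hqp : Nat.Prime d.toNat.minFac := Nat.minFac_prime hd1
    have hqd : (d.toNat.minFac : Int) ∣ d := by
      have := Int.natCast_dvd_natCast.mpr (Nat.minFac_dvd d.toNat)
      rwa [Int.toNat_of_nonneg (by omega)] at this
    have hqle : d.toNat.minFac ≤ d.toNat := Nat.minFac_le (by omega)
    refine ⟨(d.toNat.minFac : Int), by exact_mod_cast hqp.two_le, by omega,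
      by simpa using hqp, hqd.trans hdvd⟩
  · rintro ⟨p, hp2, hpb, hpp, hdvd⟩
    exact (not_prime_iff_exists_dvd b hb).mpr ⟨p, hp2, hpb, hdvd⟩

theorem not_prime_iff_exists_half (b : Int) (hb : 2 ≤ b) :
    ¬ Nat.Prime b.toNat ↔ ∃ k : Int, 2 ≤ k ∧ 2 * k ≤ b ∧ k ∣ b := by
  rw [not_prime_iff_exists_dvd b hb]
  constructor
  · rintro ⟨d, hd2, hdb, c, rfl⟩
    have hc2 : 2 ≤ c := by nlinarith
    exact ⟨d, hd2, by nlinarith, Dvd.intro c rfl⟩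
  · rintro ⟨k, hk2, hkb, hdvd⟩
    exact ⟨k, hk2, by omega, hdvd⟩

-- the break/else test that A runs on candidate c, over the primes found so far
theorem anyA (c : Int) (hc : 2 ≤ c) :
    (((PySem.List.pyRange 2 c).filter isP).reverse).any
        (fun prime => PySem.Int.mod c prime == 0) = !(isP c) := by
  have hmem : ∀ p : Int, p ∈ ((PySem.List.pyRange 2 c).filter isP).reverse ↔
      (2 ≤ p ∧ p < c ∧ Nat.Prime p.toNat) := by
    intro p
    simp [List.mem_reverse, List.mem_filter, PySem.List.mem_pyRange_one, isP, and_comm, and_assoc]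
    tauto
  cases hP : isP c with
  | false =>
    simp only [Bool.not_false, List.any_eq_true]
    have : ¬ Nat.Prime c.toNat := by simpa [isP] using hP
    obtain ⟨p, hp2, hpc, hpp, hdvd⟩ := (not_prime_iff_exists_prime_dvd c hc).mp this
    exact ⟨p, (hmem p).mpr ⟨hp2, hpc, hpp⟩, by simpa [PySem.Int.mod_eq_zero_iff_dvd] using hdvd⟩
  | true =>
    simp only [Bool.not_true, List.any_eq_false]
    intro p hp
    obtain ⟨hp2, hpc, hpp⟩ := (hmem p).mp hp
    have hprime : Nat.Prime c.toNat := by simpa [isP] using hP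
    simp only [PySem.Int.mod_eq_zero_iff_dvd, beq_iff_eq]
    intro hdvd
    exact (not_prime_iff_exists_prime_dvd c hc).mpr ⟨p, hp2, hpc, hpp, hdvd⟩ hprime

/-- A's accumulation loop produces exactly the primes below `b`, in descending order. -/
theorem foldA (b : Int) :
    (PySem.List.pyRange 2 b).foldl
      (fun primes i =>
        if primes.any (fun prime => PySem.Int.mod i prime == 0) then primes
        else PySem.List.insert primes 0 i) []
    = ((PySem.List.pyRange 2 b).filter isP).reverse := by
  by_cases h : b ≤ 2
  · simp [PySem.List.pyRange_one_eq_nil h]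
  · obtain ⟨n, hn⟩ : ∃ n : Nat, b = 2 + n := ⟨(b - 2).toNat, by omega⟩
    subst hn
    induction n with
    | zero => simp
    | succ m ih =>
      have hstep : (2 : Int) + (↑(m + 1) : Int) = (2 + (m : Int)) + 1 := by push_cast; ring
      rw [hstep, PySem.List.pyRange_one_succ_right (by omega), List.foldl_append,
        List.filter_append, List.reverse_append]
      rcases Nat.eq_zero_or_pos m with rfl | hm
      · -- m = 0 : previous range is empty, candidate is 2 (prime)
        simp [PySem.List.insert_zero, isP, Nat.prime_two]
      · have ih' := ih (by omega)
        simp only [List.foldl_cons, List.foldl_nil, ih']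
        rw [anyA (2 + (m : Int)) (by omega)]
        cases hP : isP (2 + (m : Int)) with
        | false => simp [hP]
        | true => simp [hP, PySem.List.insert_zero]

theorem getD_set_true (c : List Bool) (t j : Nat) (hj : j < c.length) :
    (c.set t true).getD j false = if t = j then true else c.getD j false := by
  by_cases h : t = j
  · subst h; simp [List.getD_eq_getElem?_getD, hj]
  · simp [List.getD_eq_getElem?_getD, h]

theorem length_setfold (M : List Int) (c : List Bool) :
    (M.foldl (fun c m => c.set m.toNat true) c).length = c.length := by
  induction M generalizing c with
  | nil => rfl
  | cons m M ih => simp [ih]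

theorem setfold_getD (M : List Int) (hM : ∀ m ∈ M, 0 ≤ m) (c : List Bool) (j : Nat)
    (hj : j < c.length) :
    (M.foldl (fun c m => c.set m.toNat true) c).getD j false
      = (c.getD j false || M.any (fun m => m == (j : Int))) := by
  induction M generalizing c with
  | nil => simp
  | cons m M ih =>
    have hm0 : 0 ≤ m := hM m (by simp)
    simp only [List.foldl_cons, List.any_cons]
    rw [ih (fun m' hm' => hM m' (by simp [hm'])) _ (by simpa using hj),
      getD_set_true _ _ _ hj]
    by_cases h : m = (j : Int)
    · simp [h]
    · have h2 : m.toNat ≠ j := by omega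
      simp [beq_eq_false_iff_ne.mpr h, h2]

theorem sieve_length (x b : Int) :
    ((PySem.List.pyRange 2 b).foldl
      (fun comp k =>
        (PySem.List.pyRange (2 * k) x k).foldl
          (fun comp m => comp.set m.toNat true) comp)
      (List.replicate x.toNat false)).length = x.toNat := by
  have h : ∀ (L : List Int) (c : List Bool),
      (L.foldl (fun comp k =>
        (PySem.List.pyRange (2 * k) x k).foldl
          (fun comp m => comp.set m.toNat true) comp) c).length = c.length := by
    intro L
    induction L with
    | nil => intro c; rfl
    | cons k L ih => intro c; rw [List.foldl_cons, ih, length_setfold]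
  rw [h]; simp

/-- After sieving the strides of every k in [2, b), cell j is marked iff some such k ≥ 2
divides j with cofactor ≥ 2. -/
theorem sieve_getD (x : Int) (b : Int) (hb : b ≤ x) (j : Nat) (hj : (j : Int) < x) :
    (((PySem.List.pyRange 2 b).foldl
      (fun comp k =>
        (PySem.List.pyRange (2 * k) x k).foldl
          (fun comp m => comp.set m.toNat true) comp)
      (List.replicate x.toNat false)).getD j false = true)
    ↔ (∃ k : Int, 2 ≤ k ∧ k < b ∧ k ∣ (j : Int) ∧ 2 * k ≤ (j : Int)) := by
  by_cases h : b ≤ 2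
  · rw [PySem.List.pyRange_one_eq_nil h]
    simp only [List.foldl_nil]
    have hz : (List.replicate x.toNat false).getD j false = false := by
      rw [List.getD_eq_getElem?_getD, List.getElem?_replicate]
      split <;> rfl
    rw [hz]
    constructor
    · intro h'; exact absurd h' (by simp)
    · rintro ⟨k, hk2, hkb, -, -⟩; omega
  · obtain ⟨n, hn⟩ : ∃ n : Nat, b = 2 + n := ⟨(b - 2).toNat, by omega⟩
    subst hn
    induction n with
    | zero => omega
    | succ m ih =>
      have hstep : (2 : Int) + (↑(m + 1) : Int) = (2 + (m : Int)) + 1 := by push_cast; ring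
      rw [hstep, PySem.List.pyRange_one_succ_right (by omega), List.foldl_append,
        List.foldl_cons, List.foldl_nil]
      set c := (2 : Int) + (m : Int) with hc
      have hc2 : 2 ≤ c := by omega
      have hMpos : ∀ m' ∈ PySem.List.pyRange (2 * c) x c, 0 ≤ m' := by
        intro m' hm'
        have := (PySem.List.mem_pyRange_iff_of_pos (by omega) m').mp hm'
        omega
      rw [setfold_getD _ hMpos _ j (by rw [sieve_length]; omega), Bool.or_eq_true]
      have hdvd2c : c ∣ 2 * c := ⟨2, by ring⟩
      have hany : ((PySem.List.pyRange (2 * c) x c).any (fun m' => m' == (j : Int)) = true)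
          ↔ (2 * c ≤ (j : Int) ∧ c ∣ (j : Int)) := by
        rw [List.any_eq_true]
        constructor
        · rintro ⟨m', hm', he⟩
          have he' : m' = (j : Int) := by simpa using he
          subst he'
          obtain ⟨h1, h2, h3⟩ := (PySem.List.mem_pyRange_iff_of_pos (by omega) _).mp hm'
          refine ⟨h1, ?_⟩
          have := dvd_add h3 hdvd2c
          simpa using this
        · rintro ⟨h1, h2⟩
          refine ⟨(j : Int), ?_, by simp⟩
          rw [PySem.List.mem_pyRange_iff_of_pos (by omega)]
          exact ⟨h1, hj, dvd_sub h2 hdvd2c⟩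
      have hprev : (((PySem.List.pyRange 2 c).foldl
          (fun comp k =>
            (PySem.List.pyRange (2 * k) x k).foldl
              (fun comp m => comp.set m.toNat true) comp)
          (List.replicate x.toNat false)).getD j false = true)
          ↔ (∃ k : Int, 2 ≤ k ∧ k < c ∧ k ∣ (j : Int) ∧ 2 * k ≤ (j : Int)) := by
        rcases Nat.eq_zero_or_pos m with rfl | hm
        · rw [show c = (2 : Int) by omega, PySem.List.pyRange_one_eq_nil (by omega)]
          simp only [List.foldl_nil]
          have hz : (List.replicate x.toNat false).getD j false = false := by
            rw [List.getD_eq_getElem?_getD, List.getElem?_replicate]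
            split <;> rfl
          rw [hz]
          constructor
          · intro h'; exact absurd h' (by simp)
          · rintro ⟨k, hk2, hkb, -, -⟩; omega
        · exact ih (by omega) (by omega)
      rw [hprev, hany]
      constructor
      · rintro (⟨k, hk2, hkc, hdvd, hk⟩ | ⟨h1, h2⟩)
        · exact ⟨k, hk2, by omega, hdvd, hk⟩
        · exact ⟨c, hc2, by omega, h2, h1⟩
      · rintro ⟨k, hk2, hkc1, hdvd, hk⟩
        by_cases hkc : k < c
        · exact Or.inl ⟨k, hk2, hkc, hdvd, hk⟩
        · have hkeq : k = c := by omega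
          subst hkeq
          exact Or.inr ⟨hk, hdvd⟩

/-- Array.getD reads through toList. -/
theorem arr_getD_toList (a : Array Bool) (i : Nat) (d : Bool) :
    a.getD i d = a.toList.getD i d := by
  unfold Array.getD
  split
  · next h => rw [List.getD_eq_getElem _ _ (by simpa using h)]; simp
  · next h =>
    rw [List.getD_eq_getElem?_getD, List.getElem?_eq_none (by simpa using Nat.le_of_not_lt h)]
    rfl

theorem toList_setfold (M : List Int) (a : Array Bool) :
    (M.foldl (fun a m => a.setIfInBounds m.toNat true) a).toList
      = M.foldl (fun c m => c.set m.toNat true) a.toList := by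
  induction M generalizing a with
  | nil => rfl
  | cons m M ih => simp [ih, Array.toList_setIfInBounds]

/-- B's array sieve computes, through toList, the list-level sieve. -/
theorem toList_sieve (x b : Int) :
    ((PySem.List.pyRange 2 b).foldl
      (fun comp k =>
        (PySem.List.pyRange (2 * k) x k).foldl
          (fun comp m => comp.setIfInBounds m.toNat true) comp)
      (Array.replicate x.toNat false)).toList
    = (PySem.List.pyRange 2 b).foldl
      (fun comp k =>
        (PySem.List.pyRange (2 * k) x k).foldl
          (fun comp m => comp.set m.toNat true) comp)
      (List.replicate x.toNat false) := by
  have h : ∀ (L : List Int) (a : Array Bool),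
      (L.foldl (fun comp k =>
        (PySem.List.pyRange (2 * k) x k).foldl
          (fun comp m => comp.setIfInBounds m.toNat true) comp) a).toList
      = L.foldl (fun comp k =>
        (PySem.List.pyRange (2 * k) x k).foldl
          (fun comp m => comp.set m.toNat true) comp) a.toList := by
    intro L
    induction L with
    | nil => intro a; rfl
    | cons k L ih => intro a; rw [List.foldl_cons, List.foldl_cons, ih, toList_setfold]
  rw [h, Array.toList_replicate]

/-- B's sieve read-out agrees pointwise with primality on [2, x). -/
theorem comp_pointwise (x : Int) (i : Int) (hi2 : 2 ≤ i) (hix : i < x) :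
    (!(((PySem.List.pyRange 2 x).foldl
          (fun comp k =>
            (PySem.List.pyRange (2 * k) x k).foldl
              (fun comp m => comp.setIfInBounds m.toNat true) comp)
          (Array.replicate x.toNat false)).getD
        i.toNat false)) = isP i := by
  rw [arr_getD_toList, toList_sieve]
  have hcast : ((i.toNat : Int)) = i := Int.toNat_of_nonneg (by omega)
  have hQ := sieve_getD x x le_rfl i.toNat (by omega)
  rw [hcast] at hQ
  have hNP : (((PySem.List.pyRange 2 x).foldl
      (fun comp k =>
        (PySem.List.pyRange (2 * k) x k).foldl
          (fun comp m => comp.set m.toNat true) comp)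
      (List.replicate x.toNat false)).getD i.toNat false = true)
      ↔ ¬ Nat.Prime i.toNat := by
    rw [hQ, not_prime_iff_exists_half i hi2]
    constructor
    · rintro ⟨k, hk2, -, hdvd, hk⟩; exact ⟨k, hk2, hk, hdvd⟩
    · rintro ⟨k, hk2, hk, hdvd⟩; exact ⟨k, hk2, by omega, hdvd, hk⟩
  cases hb : (((PySem.List.pyRange 2 x).foldl
      (fun comp k =>
        (PySem.List.pyRange (2 * k) x k).foldl
          (fun comp m => comp.set m.toNat true) comp)
      (List.replicate x.toNat false)).getD i.toNat false) with
  | false =>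
    have : Nat.Prime i.toNat := by
      by_contra hnp
      rw [← hNP] at hnp
      rw [hb] at hnp
      exact absurd hnp (by simp)
    simp [isP, this]
  | true =>
    have : ¬ Nat.Prime i.toNat := hNP.mp hb
    simp [isP, this]

-- ===== VERDICT (by name: the statement is the Claim_ definition above) =====
theorem get_biggest_prime_less_than_x_spec : Claim_equal_get_biggest_prime_less_than_x := by
  intro x _
  unfold Spec_get_biggest_prime_less_than_x
  by_cases hx : x ≤ 2
  · unfold get_biggest_prime_less_than_x get_biggest_prime_less_than_x_alt
    rw [if_pos hx, PySem.List.pyRange_one_eq_nil hx]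
    rfl
  · have hexp : get_biggest_prime_less_than_x_alt x =
        (match ((PySem.List.pyRange 2 x).filter (fun i =>
          !(((PySem.List.pyRange 2 x).foldl
                (fun comp k =>
                  (PySem.List.pyRange (2 * k) x k).foldl
                    (fun comp m => comp.setIfInBounds m.toNat true) comp)
                (Array.replicate x.toNat false)).getD
              i.toNat false))).reverse with
        | [] => ((none : Option Int), (none : Option Int))
        | p :: rest =>
          (some p, (p :: rest).find? (fun q => PySem.Int.mod (p + 1) q == 0))) := by
      unfold get_biggest_prime_less_than_x_alt
      rw [if_neg hx]
    rw [hexp]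
    unfold get_biggest_prime_less_than_x
    have hfilter : (PySem.List.pyRange 2 x).filter (fun i =>
        !(((PySem.List.pyRange 2 x).foldl
              (fun comp k =>
                (PySem.List.pyRange (2 * k) x k).foldl
                  (fun comp m => comp.setIfInBounds m.toNat true) comp)
              (Array.replicate x.toNat false)).getD
            i.toNat false)) = (PySem.List.pyRange 2 x).filter isP := by
      apply List.filter_congr
      intro i hi
      obtain ⟨hi2, hix⟩ := (PySem.List.mem_pyRange_one).mp hi
      exact comp_pointwise x i hi2 hix
    rw [hfilter, foldA]
    cases ((PySem.List.pyRange 2 x).filter isP).reverse with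
    | nil => rfl
    | cons p rest => simp [pvFactor]
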